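-- pv_equiv track=rewrite | github.com/nicolasJimenez11/ARD | quiz/ARD.py | es_id
-- ===== SOURCE A (Python) =====
-- def es_id(s: str) -> bool:
--     # ID = [A-Za-z]([a-z][0-9])*
--     if len(s) == 0:
--         return False
--
--     def es_primera(ch: str) -> bool:
--         return ('A' <= ch <= 'Z') or ('a' <= ch <= 'z')
--
--     def es_minuscula(ch: str) -> bool:
--         return 'a' <= ch <= 'z'
--
--     def es_digito(ch: str) -> bool:
--         return '0' <= ch <= '9'
--
--     # q0 -> q1
--     if not es_primera(s[0]):
--         return False
--
--     estado = "q1"  # aceptación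
--     i = 1
--
--     while i < len(s):
--         ch = s[i]
--
--         if estado == "q1":
--             # Solo puede iniciar un par (minuscula, digito)
--             if es_minuscula(ch):
--                 estado = "q2"
--             else:
--                 return False
--
--         elif estado == "q2":
--             # Debe venir un dígito para cerrar el par y volver a q1
--             if es_digito(ch):
--                 estado = "q1"
--             else:
--                 return False
--
--         i += 1
--
--     return estado == "q1"
-- ===== SOURCE B (Python) =====
-- def es_id(s: str) -> bool:
--     if len(s) == 0:
--         return False
--     c = s[0]
--     if not (('A' <= c <= 'Z') or ('a' <= c <= 'z')):
--         return False
--     if (len(s) - 1) % 2 != 0: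
--         return False
--     for i in range(1, len(s), 2):
--         if not ('a' <= s[i] <= 'z'):
--             return False
--         if not ('0' <= s[i + 1] <= '9'):
--             return False
--     return True
-- ===== Notes on version B (the rewrite author's own statement) =====
-- stated objective: simpler
-- what changed: Replaced the explicit two-state DFA loop with a parity guard on len(s)-1 plus a single pass over (lowercase, digit) pairs taken two characters at a time.
import Mathlib
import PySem

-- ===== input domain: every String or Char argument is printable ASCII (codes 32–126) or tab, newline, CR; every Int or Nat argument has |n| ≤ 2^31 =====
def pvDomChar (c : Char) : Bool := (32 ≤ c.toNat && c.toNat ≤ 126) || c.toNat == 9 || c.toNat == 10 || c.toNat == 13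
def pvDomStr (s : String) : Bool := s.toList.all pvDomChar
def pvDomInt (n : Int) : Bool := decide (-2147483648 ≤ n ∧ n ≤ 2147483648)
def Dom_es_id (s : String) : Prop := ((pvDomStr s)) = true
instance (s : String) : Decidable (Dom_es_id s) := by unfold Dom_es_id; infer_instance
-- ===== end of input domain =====

-- ===== PORT A =====
-- B replaces A's two-state DFA loop by a parity guard plus a pair-wise scan (objective: simpler).
def esPrimera (c : Char) : Bool := ('A' ≤ c && c ≤ 'Z') || ('a' ≤ c && c ≤ 'z')
def esMinuscula (c : Char) : Bool := 'a' ≤ c && c ≤ 'z'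
def esDigito (c : Char) : Bool := '0' ≤ c && c ≤ '9'

-- the while loop of A; the Bool state: true = "q1", false = "q2"
def esIdLoop : Bool → List Char → Bool
  | st, [] => st
  | true, c :: r => if esMinuscula c then esIdLoop false r else false
  | false, c :: r => if esDigito c then esIdLoop true r else false

def es_id (s : String) : Bool :=
  match s.toList with
  | [] => false
  | c :: r => if esPrimera c then esIdLoop true r else false

-- ===== PORT B =====
-- the for-loop of B: consumes the tail two characters at a time
def esIdPairs : List Char → Bool
  | a :: b :: r => if esMinuscula a then (if esDigito b then esIdPairs r else false) else false
  | _ => true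

def es_id_alt (s : String) : Bool :=
  match s.toList with
  | [] => false
  | c :: r =>
    if esPrimera c then
      (if r.length % 2 == 0 then esIdPairs r else false)
    else false

-- ===== PRECONDITION & SPEC =====
def Spec_es_id (s : String) (out : Bool) : Prop := out = es_id_alt s
instance (s : String) (out : Bool) : Decidable (Spec_es_id s out) := by unfold Spec_es_id; infer_instance

-- ===== CLAIM (what is proved, stated in full; the proofs are below) =====
def Claim_equal_es_id : Prop := ∀ (s : String), Dom_es_id s → Spec_es_id s (es_id s)

-- ===== LEMMAS AND PROOFS =====
theorem esIdLoop_eq : ∀ (l : List Char),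
    esIdLoop true l = (if l.length % 2 == 0 then esIdPairs l else false)
  | [] => by simp [esIdLoop, esIdPairs]
  | [a] => by
      by_cases hm : esMinuscula a = true <;> simp [esIdLoop, hm]
  | a :: b :: r => by
      have ih := esIdLoop_eq r
      by_cases hm : esMinuscula a = true
      · by_cases hd : esDigito b = true
        · have h2 : (r.length + 1 + 1) % 2 = r.length % 2 := by omega
          simpa [esIdLoop, esIdPairs, hm, hd, h2] using ih
        · simp [esIdLoop, esIdPairs, hm, hd]
      · simp [esIdLoop, esIdPairs, hm]

-- ===== VERDICT (by name: the statement is the Claim_ definition above) =====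
theorem es_id_spec : Claim_equal_es_id := by
  intro s _
  unfold Spec_es_id es_id es_id_alt
  cases h : s.toList with
  | nil => rfl
  | cons c r =>
      by_cases hp : esPrimera c = true
      · simp [hp, esIdLoop_eq]
      · simp [hp]
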